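-- pv_equiv track=rewrite | github.com/jamiejamiebobamie/pythonPlayground | howManySquares.py | howManyTwo
-- ===== SOURCE A (Python) =====
-- def howManyTwo(A):
--     """
--     (Works.)
--
--     This function assumes that the first vertex is the top-leftmost point
--     and the last vertex is the bottom-rightmost point.
--
--     It also assumes the input array has only integer vertex values.
--     """
--     result = 0
--
--     increment = A[len(A)-1][0]-A[0][0]
--
--     for point in A:
--         for i in range(1, increment+1):
--             if (point[0]+i, point[1]) in A and (point[0], point[1]+i)in A and (point[0]+i, point[1]+i)in A:
--                 result+=1
--     return result
-- ===== SOURCE B (Python) =====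
-- def howManyTwo(A):
--     result = 0
--     increment = A[len(A)-1][0] - A[0][0]
--     pts = set(A)
--     for p in A:
--         for q in pts:
--             d = q[0] - p[0]
--             if d == q[1] - p[1] and 1 <= d <= increment \
--                and (p[0] + d, p[1]) in pts and (p[0], p[1] + d) in pts:
--                 result += 1
--     return result
-- ===== Notes on version B (the rewrite author's own statement) =====
-- stated objective: faster
-- what changed: Instead of scanning every side length 1..increment per point with O(n) list membership tests, B builds a hash set once and enumerates point pairs (top-left, bottom-right) with O(1) set lookups for the other two corners.
import Mathlib
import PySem

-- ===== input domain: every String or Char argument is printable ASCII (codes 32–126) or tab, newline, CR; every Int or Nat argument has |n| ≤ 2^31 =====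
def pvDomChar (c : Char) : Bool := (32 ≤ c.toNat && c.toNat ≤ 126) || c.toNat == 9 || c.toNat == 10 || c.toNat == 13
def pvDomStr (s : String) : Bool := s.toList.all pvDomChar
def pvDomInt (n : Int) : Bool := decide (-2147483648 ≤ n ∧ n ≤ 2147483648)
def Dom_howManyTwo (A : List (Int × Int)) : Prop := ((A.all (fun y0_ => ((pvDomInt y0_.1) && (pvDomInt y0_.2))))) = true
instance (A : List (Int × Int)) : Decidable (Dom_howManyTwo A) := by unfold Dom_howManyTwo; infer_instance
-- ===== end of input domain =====

-- B replaces A's per-point scan over all side lengths 1..increment (with O(n) list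
-- membership tests) by one hash set of the points and an enumeration of (top-left,
-- bottom-right) point pairs with O(1) corner lookups; objective: faster.

-- ===== PORT A =====
def howManyTwo (A : List (Int × Int)) : Int :=
  -- increment = A[len(A)-1][0] - A[0][0]; on [] Python raises IndexError (excluded by Pre_)
  let increment : Int :=
    match PySem.List.pyGet? A ((A.length : Int) - 1), PySem.List.pyGet? A 0 with
    | some last, some first => last.1 - first.1
    | _, _ => 0
  A.foldl (fun result point =>
    (PySem.List.pyRange 1 (increment + 1) 1).foldl (fun result i =>
      if (point.1 + i, point.2) ∈ A ∧ (point.1, point.2 + i) ∈ A ∧ (point.1 + i, point.2 + i) ∈ A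
      then result + 1 else result) result) 0

-- ===== PORT B =====
-- inner loop of B: 'for q in pts: ...' for one top-left candidate p
def pvInnerB (pts : PySem.Set (Int × Int)) (increment : Int) (p : Int × Int) (result : Int) : Int :=
  -- d = q[0] - p[0] is inlined as 'q.1 - p.1'
  pts.foldl (fun (result : Int) (q : Int × Int) =>
    if q.1 - p.1 = q.2 - p.2 ∧ 1 ≤ q.1 - p.1 ∧ q.1 - p.1 ≤ increment ∧
        (p.1 + (q.1 - p.1), p.2) ∈ pts ∧ (p.1, p.2 + (q.1 - p.1)) ∈ pts
    then result + 1 else result) result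

def howManyTwo_alt (A : List (Int × Int)) : Int :=
  -- A[len(A)-1][0] - A[0][0]; on [] Python raises (excluded by Pre_), 0 - 0 here
  let increment : Int :=
    ((PySem.List.pyGet? A ((A.length : Int) - 1)).map Prod.fst).getD 0 -
      ((PySem.List.pyGet? A 0).map Prod.fst).getD 0
  let pts : PySem.Set (Int × Int) := PySem.Set.ofList A
  A.foldl (fun result p => pvInnerB pts increment p result) 0

-- ===== PRECONDITION & SPEC =====
-- Pre_ excludes only the empty list, on which A raises IndexError (A[len(A)-1]).
def Pre_howManyTwo (A : List (Int × Int)) : Prop := A ≠ []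
instance (A : List (Int × Int)) : Decidable (Pre_howManyTwo A) := by unfold Pre_howManyTwo; infer_instance
def pvWitness_howManyTwo : (List (Int × Int)) := [(0, 0), (1, 0), (0, 1), (1, 1)]

def Spec_howManyTwo (A : List (Int × Int)) (out : Int) : Prop := out = howManyTwo_alt A
instance (A : List (Int × Int)) (out : Int) : Decidable (Spec_howManyTwo A out) := by unfold Spec_howManyTwo; infer_instance

-- ===== CLAIM (what is proved, stated in full; the proofs are below) =====
def Claim_equal_howManyTwo : Prop := ∀ (A : List (Int × Int)), Dom_howManyTwo A → Pre_howManyTwo A → Spec_howManyTwo A (howManyTwo A)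

-- ===== LEMMAS AND PROOFS =====

-- The inner loops of A and B count the same squares with top-left corner p:
-- i ↦ (p.1+i, p.2+i) is a bijection between the admissible side lengths and the
-- bottom-right corners B enumerates (the deduplicated point set has no duplicates).
theorem pv_count_eq (A : List (Int × Int)) (inc : Int) (p : Int × Int) :
    (PySem.List.pyRange 1 (inc + 1) 1).countP
      (fun i => decide ((p.1 + i, p.2) ∈ A ∧ (p.1, p.2 + i) ∈ A ∧ (p.1 + i, p.2 + i) ∈ A))
    = (PySem.Set.ofList A).countP
      (fun q => decide (q.1 - p.1 = q.2 - p.2 ∧ 1 ≤ q.1 - p.1 ∧ q.1 - p.1 ≤ inc ∧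
        (p.1 + (q.1 - p.1), p.2) ∈ PySem.Set.ofList A ∧ (p.1, p.2 + (q.1 - p.1)) ∈ PySem.Set.ofList A)) := by
  rw [List.countP_eq_length_filter, List.countP_eq_length_filter]
  have hinj : Function.Injective (fun i : Int => (p.1 + i, p.2 + i)) := by
    intro a b h
    have := congrArg Prod.fst h; simp at this; omega
  have hn1 : (((PySem.List.pyRange 1 (inc + 1) 1).filter
      (fun i => decide ((p.1 + i, p.2) ∈ A ∧ (p.1, p.2 + i) ∈ A ∧ (p.1 + i, p.2 + i) ∈ A))).map
      (fun i : Int => (p.1 + i, p.2 + i))).Nodup :=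
    ((PySem.List.nodup_pyRange_one 1 (inc + 1)).filter _).map hinj
  have hn2 : ((PySem.Set.ofList A).filter
      (fun q => decide (q.1 - p.1 = q.2 - p.2 ∧ 1 ≤ q.1 - p.1 ∧ q.1 - p.1 ≤ inc ∧
        (p.1 + (q.1 - p.1), p.2) ∈ PySem.Set.ofList A ∧ (p.1, p.2 + (q.1 - p.1)) ∈ PySem.Set.ofList A))).Nodup :=
    (PySem.Set.nodup_ofList A).filter _
  have hperm := (List.perm_ext_iff_of_nodup hn1 hn2).mpr ?_
  · have := hperm.length_eq
    simpa using this
  · intro a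
    simp only [List.mem_map, List.mem_filter, PySem.List.mem_pyRange_one, PySem.Set.mem_ofList,
      decide_eq_true_eq]
    constructor
    · rintro ⟨i, ⟨⟨h1, h2⟩, hc1, hc2, hc3⟩, rfl⟩
      refine ⟨hc3, ?_⟩
      simp only []
      constructor
      · omega
      · have hi : p.1 + i - p.1 = i := by omega
        rw [hi]
        exact ⟨by omega, by omega, hc1, hc2⟩
    · rintro ⟨ha, hd, h1, h2, hc1, hc2⟩
      refine ⟨a.1 - p.1, ⟨⟨by omega, by omega⟩, hc1, hc2, ?_⟩, ?_⟩
      · have : (p.1 + (a.1 - p.1), p.2 + (a.1 - p.1)) = a := by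
          ext <;> simp <;> omega
        rw [this]; exact ha
      · ext <;> simp <;> omega

-- ===== VERDICT (by name: the statement is the Claim_ definition above) =====
theorem howManyTwo_spec : Claim_equal_howManyTwo := by
  intro A _ hpre
  have hlen : 1 ≤ A.length := List.length_pos_iff.mpr hpre
  obtain ⟨f, hf⟩ : ∃ f, PySem.List.pyGet? A 0 = some f :=
    ⟨A[0], by rw [PySem.List.pyGet?_zero, List.getElem?_eq_getElem (by omega)]; rfl⟩
  obtain ⟨l, hl⟩ : ∃ l, PySem.List.pyGet? A ((A.length : Int) - 1) = some l := by
    have hc : ((A.length : Int) - 1) = ((A.length - 1 : Nat) : Int) := by omega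
    rw [hc, PySem.List.pyGet?_natCast]
    exact ⟨A[A.length - 1], List.getElem?_eq_getElem (by omega)⟩
  unfold Spec_howManyTwo howManyTwo howManyTwo_alt
  simp only [hf, hl, Option.map_some, Option.getD_some]
  apply PySem.List.foldl_congr_mem
  intro r p _
  unfold pvInnerB
  rw [PySem.List.foldl_ite_add_one, PySem.List.foldl_ite_add_one]
  congr 1
  exact_mod_cast pv_count_eq A _ p
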